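-- pv_equiv track=rewrite | github.com/The-Academic-Observatory/oaebu-workflows | dags/oaebu_workflows/ucl_sales_telescope/ucl_sales_telescope.py | drop_empty_rows
-- ===== SOURCE A (Python) =====
-- from typing import List, Union
--
-- def drop_empty_rows(data: List[List]) -> List[List]:
--     """Finds rows of empty strings and removes it from the data
--
--     :param data: The data to clean
--     """
--
--     empty_rows = []
--     for i, row in enumerate(data):
--         if all([c == "" for c in row]) or not row:
--             empty_rows.append(i)
--     for i in sorted(empty_rows, reverse=True):
--         del data[i]
--     return data
-- ===== SOURCE B (Python) =====
-- from typing import List, Union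
--
-- def drop_empty_rows(data: List[List]) -> List[List]:
--     """Finds rows of empty strings and removes it from the data (in place).
--
--     Single forward pass with a write cursor instead of collecting deletion
--     indices and deleting them in reverse; mutates and returns the same list.
--
--     :param data: The data to clean
--     """
--     j = 0
--     for row in data:
--         if any(c != "" for c in row):
--             data[j] = row
--             j += 1
--     del data[j:]
--     return data
-- ===== Notes on version B (the rewrite author's own statement) =====
-- stated objective: simpler
-- what changed: A collects the indices of all-empty rows in one pass and then deletes them one by one in reverse order; B does a single forward pass with a write cursor, compacting kept rows in place and truncating the tail.
import Mathlib
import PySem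

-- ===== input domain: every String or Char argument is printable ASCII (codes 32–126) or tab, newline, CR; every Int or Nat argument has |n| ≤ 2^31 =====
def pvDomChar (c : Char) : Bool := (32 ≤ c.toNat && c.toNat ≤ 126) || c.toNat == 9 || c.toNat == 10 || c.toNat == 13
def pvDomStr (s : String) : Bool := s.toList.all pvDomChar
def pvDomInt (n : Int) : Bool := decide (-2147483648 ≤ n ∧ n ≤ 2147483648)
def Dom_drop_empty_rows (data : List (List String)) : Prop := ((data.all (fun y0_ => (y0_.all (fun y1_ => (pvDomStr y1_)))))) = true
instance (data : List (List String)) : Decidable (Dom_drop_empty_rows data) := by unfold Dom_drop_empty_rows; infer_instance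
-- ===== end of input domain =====

-- B replaces A's collect-indices-then-delete-in-reverse with a single forward
-- write-cursor compaction in place (objective: simpler; same in-place mutation
-- and return of the same list object as A).


-- ===== PORT A =====
-- 'del data[i]' with 0 ≤ i < len(data) is exactly List.eraseIdx i.toNat (the
-- indices collected from enumerate are in range, and are deleted largest first).
def drop_empty_rows (data : List (List String)) : List (List String) :=
  let empty_rows : List Int :=
    (PySem.List.enumerate data).foldl
      (fun acc p =>
        if (p.2.map (fun c => c == "")).all (fun b => b) || p.2.isEmpty then acc ++ [p.1]
        else acc) []
  (PySem.List.sorted empty_rows (fun x => x) true).foldl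
    (fun d i => d.eraseIdx i.toNat) data

-- ===== PORT B =====
-- 'for row in data' reads the original rows: the write cursor j never passes the
-- read index, so 'data[j] = row' only rewrites already-read cells; hence the loop
-- is a fold over the original list carrying (buffer, j), and 'del data[j:]' is take j.
def drop_empty_rows_alt (data : List (List String)) : List (List String) :=
  let st := data.foldl
    (fun (st : List (List String) × Nat) row =>
      if row.any (fun c => c != "") then (st.1.set st.2 row, st.2 + 1) else st)
    (data, 0)
  st.1.take st.2

-- ===== PRECONDITION & SPEC =====
def Spec_drop_empty_rows (data : List (List String)) (out : List (List String)) : Prop := out = drop_empty_rows_alt data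
instance (data : List (List String)) (out : List (List String)) : Decidable (Spec_drop_empty_rows data out) := by unfold Spec_drop_empty_rows; infer_instance

-- ===== CLAIM (what is proved, stated in full; the proofs are below) =====
def Claim_equal_drop_empty_rows : Prop := ∀ (data : List (List String)), Dom_drop_empty_rows data → Spec_drop_empty_rows data (drop_empty_rows data)

-- ===== LEMMAS AND PROOFS =====

-- the row test both programs use: every cell is "" (true on the empty row)
def pvAllEmpty (row : List String) : Bool := row.all (fun c => c == "")

-- positions (from the front) of the all-empty rows
def pvIdxs : List (List String) → List Nat
  | [] => []
  | x :: t => (if pvAllEmpty x then [0] else []) ++ (pvIdxs t).map (· + 1)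

theorem pvIdxs_pairwise (xs : List (List String)) : (pvIdxs xs).Pairwise (· < ·) := by
  induction xs with
  | nil => simp [pvIdxs]
  | cons x t ih =>
    simp only [pvIdxs]
    by_cases h : pvAllEmpty x = true <;>
      simp [h, List.pairwise_map, ih]

theorem pvEnum_filter (xs : List (List String)) (s : Int) :
    ((PySem.List.enumerate xs s).filter
        (fun q => (q.2.map (fun c => c == "")).all (fun b => b) || q.2.isEmpty)).map (·.1)
      = (pvIdxs xs).map (fun n : Nat => s + (n : Int)) := by
  induction xs generalizing s with
  | nil => simp [PySem.List.enumerate_nil, pvIdxs]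
  | cons x t ih =>
    rw [PySem.List.enumerate_cons]
    have hx : ((x.map (fun c => c == "")).all (fun b => b) || x.isEmpty) = pvAllEmpty x := by
      cases x <;> simp [pvAllEmpty, List.all_map, Function.comp_def]
    by_cases h : pvAllEmpty x = true
    · simp only [pvIdxs, List.filter_cons, hx, h, if_true, List.map_cons,
        List.singleton_append, ih]
      refine List.cons_eq_cons.mpr ⟨by ring, ?_⟩
      rw [List.map_map]
      exact List.map_congr_left (fun n _ => by simp only [Function.comp_apply]; push_cast; ring)
    · simp only [pvIdxs, List.filter_cons, hx, h, if_false, Bool.false_eq_true, ih,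
        List.nil_append]
      rw [List.map_map]
      exact List.map_congr_left (fun n _ => by simp only [Function.comp_apply]; push_cast; ring)

theorem pvFold_erase_succ (js : List Nat) (x : List String) (t : List (List String)) :
    (js.map (· + 1)).foldl (fun d i => d.eraseIdx i) (x :: t)
      = x :: js.foldl (fun d i => d.eraseIdx i) t := by
  induction js generalizing t with
  | nil => simp
  | cons j js ih => simp [List.eraseIdx_cons_succ, ih]

theorem pvDel_idxs (xs : List (List String)) :
    (pvIdxs xs).reverse.foldl (fun d i => d.eraseIdx i) xs
      = xs.filter (fun r => !pvAllEmpty r) := by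
  induction xs with
  | nil => simp [pvIdxs]
  | cons x t ih =>
    simp only [pvIdxs, List.filter_cons]
    by_cases h : pvAllEmpty x = true
    · simp only [h, if_true, List.singleton_append, List.reverse_cons]
      rw [List.foldl_append, ← List.map_reverse, pvFold_erase_succ, ih]
      simp
    · simp only [h, if_false, Bool.false_eq_true, List.nil_append]
      rw [← List.map_reverse, pvFold_erase_succ, ih]
      simp

-- A computes the filter of the all-empty test
theorem pvA_eq_filter (data : List (List String)) :
    drop_empty_rows data = data.filter (fun r => !pvAllEmpty r) := by
  unfold drop_empty_rows
  rw [PySem.List.foldl_append_if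
        (p := fun q : Int × List String =>
          (q.2.map (fun c => c == "")).all (fun b => b) || q.2.isEmpty)
        (f := fun q : Int × List String => q.1),
      List.nil_append, pvEnum_filter]
  have hs : PySem.List.sorted ((pvIdxs data).map (fun n : Nat => (0 : Int) + (n : Int)))
      (fun x => x) true = ((pvIdxs data).map (fun n : Nat => (0 : Int) + (n : Int))).reverse := by
    apply PySem.List.sorted_rev_eq_of_perm_of_pairwise_gt
    · exact (List.reverse_perm _)
    · rw [List.pairwise_reverse]
      simpa [List.pairwise_map] using
        (pvIdxs_pairwise data).imp (fun {a b} h => by exact_mod_cast by omega)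
  show List.foldl (fun d i => d.eraseIdx i.toNat) data
      (PySem.List.sorted ((pvIdxs data).map (fun n : Nat => (0 : Int) + (n : Int)))
        (fun x => x) true)
    = data.filter (fun r => !pvAllEmpty r)
  rw [hs, ← List.map_reverse, List.foldl_map]
  simp only [zero_add, Int.toNat_natCast]
  exact pvDel_idxs data

-- B's compaction loop: writing kept rows at the cursor over a long-enough buffer
theorem pvB_inv (rows : List (List String)) :
    ∀ (w rest : List (List String)), rows.length ≤ rest.length →
    (let st := rows.foldl
        (fun (st : List (List String) × Nat) row =>
          if row.any (fun c => c != "") then (st.1.set st.2 row, st.2 + 1) else st)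
        (w ++ rest, w.length)
     st.1.take st.2) = w ++ rows.filter (fun row => row.any (fun c => c != "")) := by
  induction rows with
  | nil => intro w rest _; simp
  | cons r rows ih =>
    intro w rest hlen
    cases rest with
    | nil => simp at hlen
    | cons r0 rest' =>
      simp only [List.foldl_cons, List.filter_cons]
      by_cases h : r.any (fun c => c != "") = true
      · simp only [h, if_true]
        have hset : (w ++ r0 :: rest').set w.length r = (w ++ [r]) ++ rest' := by
          rw [List.set_append_right _ _ (le_refl _)]
          simp
        rw [hset]
        have := ih (w ++ [r]) rest' (by simpa using Nat.le_of_succ_le_succ hlen)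
        simpa [List.append_assoc] using this
      · rw [if_neg h]
        have hle : rows.length ≤ (r0 :: rest').length :=
          (Nat.le_of_succ_le_succ hlen).trans (Nat.le_succ _)
        simpa [h] using ih w (r0 :: rest') hle

theorem pvB_eq_filter (data : List (List String)) :
    drop_empty_rows_alt data = data.filter (fun r => !pvAllEmpty r) := by
  unfold drop_empty_rows_alt
  have h := pvB_inv data [] data (le_refl _)
  refine Eq.trans (b := data.filter (fun row => row.any (fun c => c != ""))) ?_ ?_
  · exact h
  · exact List.filter_congr (fun r _ => by
      cases r with
      | nil => simp [pvAllEmpty]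
      | cons c t => cases hc : c == "" <;> simp [pvAllEmpty, hc, bne, List.any_eq_not_all_not])

-- ===== VERDICT (by name: the statement is the Claim_ definition above) =====
theorem drop_empty_rows_spec : Claim_equal_drop_empty_rows := by
  intro data _
  unfold Spec_drop_empty_rows
  rw [pvA_eq_filter, pvB_eq_filter]
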